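-- pv_equiv track=rewrite | github.com/stephencummins/MaceStyle | MaceStyleValidator/ValidateDocument/__init__.py | build_dynamic_claude_prompt
-- ===== SOURCE A (Python) =====
-- def build_dynamic_claude_prompt(ai_rules, document_text):
--     """Build Claude prompt dynamically from SharePoint rules where UseAI=True"""
--
--     # Group rules by type for better organization
--     rules_by_type = {}
--     for rule in ai_rules:
--         rule_type = rule.get('rule_type', 'Other')
--         if rule_type not in rules_by_type:
--             rules_by_type[rule_type] = []
--         rules_by_type[rule_type].append(rule)
--
--     # Build rules description
--     rules_description = []
--     for rule_type, rules in sorted(rules_by_type.items()):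
--         rules_description.append(f"\n**{rule_type} Rules:**")
--         for rule in rules:
--             title = rule.get('title', 'Unknown rule')
--             expected = rule.get('expected_value', '')
--             if expected:
--                 rules_description.append(f"- {title} (use: {expected})")
--             else:
--                 rules_description.append(f"- {title}")
--
--     prompt = f"""You are a professional document editor applying the Mace Control Centre Writing Style Guide.
--
-- Apply ALL of the following corrections to the text:
-- {''.join(rules_description)}
--
-- Return a JSON object with two fields:
-- 1. "corrected_text": the full corrected text (preserve paragraph breaks as \\n\\n)
-- 2. "changes_made": total count of ALL changes made
--
-- Text to correct:
-- {document_text}"""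
--
--     return prompt
-- ===== SOURCE B (Python) =====
-- def _rule_line(rule):
--     title = rule.get('title', 'Unknown rule')
--     expected = rule.get('expected_value', '')
--     return f"- {title} (use: {expected})" if expected else f"- {title}"
--
--
-- def build_dynamic_claude_prompt(ai_rules, document_text):
--     """Build Claude prompt from AI rules: sorted distinct types, one filter pass per type."""
--     rule_type = lambda rule: rule.get('rule_type', 'Other')
--     pieces = []
--     for t in sorted({rule_type(r) for r in ai_rules}):
--         pieces.append(f"\n**{t} Rules:**")
--         pieces.extend(_rule_line(r) for r in ai_rules if rule_type(r) == t)
--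
--     return f"""You are a professional document editor applying the Mace Control Centre Writing Style Guide.
--
-- Apply ALL of the following corrections to the text:
-- {''.join(pieces)}
--
-- Return a JSON object with two fields:
-- 1. "corrected_text": the full corrected text (preserve paragraph breaks as \\n\\n)
-- 2. "changes_made": total count of ALL changes made
--
-- Text to correct:
-- {document_text}"""
-- ===== Notes on version B (the rewrite author's own statement) =====
-- stated objective: idiomatic
-- what changed: Replaces A's one-pass dict grouping plus sorting of dict items by a sorted set of distinct rule types with one filter pass over the rules per type (no grouping dict at all).
import Mathlib
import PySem

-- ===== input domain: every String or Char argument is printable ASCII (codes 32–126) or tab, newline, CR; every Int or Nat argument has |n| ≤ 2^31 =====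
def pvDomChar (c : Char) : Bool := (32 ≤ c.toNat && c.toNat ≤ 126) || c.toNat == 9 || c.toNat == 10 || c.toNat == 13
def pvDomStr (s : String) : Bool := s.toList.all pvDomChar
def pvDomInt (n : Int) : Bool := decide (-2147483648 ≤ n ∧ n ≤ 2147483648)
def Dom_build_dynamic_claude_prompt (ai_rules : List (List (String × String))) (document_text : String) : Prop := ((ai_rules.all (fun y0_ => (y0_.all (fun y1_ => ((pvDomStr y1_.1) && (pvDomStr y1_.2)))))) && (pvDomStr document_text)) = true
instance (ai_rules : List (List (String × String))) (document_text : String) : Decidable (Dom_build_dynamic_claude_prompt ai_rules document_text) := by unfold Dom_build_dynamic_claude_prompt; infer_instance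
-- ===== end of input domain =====

-- B replaces A's one-pass dict grouping by a sorted set of distinct rule types with one
-- filter pass per type (simpler/idiomatic; same output, no speed claim).

-- shared accessor: Python dict .get(k, dflt) on a rule (association list, first match)
def pvRuleGet (rule : List (String × String)) (k dflt : String) : String :=
  ((rule.find? (fun p => p.1 == k)).map (fun p => p.2)).getD dflt

-- the f-string template around the joined rule lines (identical in A and B)
def pvTplHead : String := "You are a professional document editor applying the Mace Control Centre Writing Style Guide.\n\nApply ALL of the following corrections to the text:\n"
def pvTplMid : String := "\n\nReturn a JSON object with two fields:\n1. \"corrected_text\": the full corrected text (preserve paragraph breaks as \\n\\n)\n2. \"changes_made\": total count of ALL changes made\n\nText to correct:\n"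

-- ===== PORT A =====
-- Note: A sorts rules_by_type.items(); since dict keys are unique, Python's tuple
-- comparison never reaches the second component, so sorting with key = first component
-- is exact here.
def build_dynamic_claude_prompt (ai_rules : List (List (String × String))) (document_text : String) : String :=
  let rules_by_type : PySem.Dict String (List (List (String × String))) :=
    ai_rules.foldl (fun d rule =>
      let rule_type := pvRuleGet rule "rule_type" "Other"
      let d := if d.contains rule_type then d else d.insert rule_type []
      d.modify rule_type [] (fun l => l ++ [rule])) PySem.Dict.empty
  let rules_description : List String :=
    (PySem.List.sorted rules_by_type.items (fun p => p.1)).foldl (fun acc p =>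
      let acc := acc ++ ["\n**" ++ p.1 ++ " Rules:**"]
      p.2.foldl (fun acc rule =>
        let title := pvRuleGet rule "title" "Unknown rule"
        let expected := pvRuleGet rule "expected_value" ""
        if expected ≠ "" then acc ++ ["- " ++ title ++ " (use: " ++ expected ++ ")"]
        else acc ++ ["- " ++ title]) acc) []
  pvTplHead ++ PySem.Str.join "" rules_description ++ pvTplMid ++ document_text

-- ===== PORT B =====
def pvRuleLine (rule : List (String × String)) : String :=
  let title := pvRuleGet rule "title" "Unknown rule"
  let expected := pvRuleGet rule "expected_value" ""
  if expected ≠ "" then "- " ++ title ++ " (use: " ++ expected ++ ")" else "- " ++ title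

def build_dynamic_claude_prompt_alt (ai_rules : List (List (String × String))) (document_text : String) : String :=
  let rule_type := fun rule => pvRuleGet rule "rule_type" "Other"
  let pieces : List String :=
    (PySem.List.sorted (PySem.Set.ofList (ai_rules.map rule_type)) (fun x => x)).flatMap
      (fun t => ("\n**" ++ t ++ " Rules:**") ::
        (ai_rules.filter (fun r => rule_type r == t)).map pvRuleLine)
  pvTplHead ++ PySem.Str.join "" pieces ++ pvTplMid ++ document_text

-- ===== PRECONDITION & SPEC =====
def Spec_build_dynamic_claude_prompt (ai_rules : List (List (String × String))) (document_text : String) (out : String) : Prop := out = build_dynamic_claude_prompt_alt ai_rules document_text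
instance (ai_rules : List (List (String × String))) (document_text : String) (out : String) : Decidable (Spec_build_dynamic_claude_prompt ai_rules document_text out) := by unfold Spec_build_dynamic_claude_prompt; infer_instance

-- ===== CLAIM (what is proved, stated in full; the proofs are below) =====
def Claim_equal_build_dynamic_claude_prompt : Prop := ∀ (ai_rules : List (List (String × String))) (document_text : String), Dom_build_dynamic_claude_prompt ai_rules document_text → Spec_build_dynamic_claude_prompt ai_rules document_text (build_dynamic_claude_prompt ai_rules document_text)

-- ===== LEMMAS AND PROOFS =====

-- A's loop body (setdefault-then-append) is one Dict.modify
theorem pvStepA_eq {κ ν : Type} [BEq κ] [LawfulBEq κ] (d : PySem.Dict κ (List ν)) (k : κ)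
    (f : List ν → List ν) :
    (if d.contains k then d else d.insert k []).modify k [] f = d.modify k [] f := by
  by_cases h : d.contains k = true
  · simp [h]
  · simp only [Bool.not_eq_true] at h
    simp [h, PySem.Dict.modify, PySem.Dict.getD_insert_self, PySem.Dict.insert_insert_self,
      PySem.Dict.getD_of_not_contains d [] h]

-- the grouping dict of A, characterised
theorem pvDict_eq (ai_rules : List (List (String × String))) :
    (ai_rules.foldl (fun d rule =>
        let rule_type := pvRuleGet rule "rule_type" "Other"
        let d := if d.contains rule_type then d else d.insert rule_type []
        d.modify rule_type [] (fun l => l ++ [rule])) PySem.Dict.empty)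
    = ai_rules.foldl (fun d rule =>
        d.modify (pvRuleGet rule "rule_type" "Other") [] (fun l => l ++ [rule]))
        PySem.Dict.empty := by
  congr 1
  funext d rule
  exact pvStepA_eq d _ _

-- inner per-rule loop of A appends exactly pvRuleLine
theorem pvInner_eq (rules : List (List (String × String))) (acc : List String) :
    rules.foldl (fun acc rule =>
        let title := pvRuleGet rule "title" "Unknown rule"
        let expected := pvRuleGet rule "expected_value" ""
        if expected ≠ "" then acc ++ ["- " ++ title ++ " (use: " ++ expected ++ ")"]
        else acc ++ ["- " ++ title]) acc
    = acc ++ rules.map pvRuleLine := by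
  have h : (fun (acc : List String) (rule : List (String × String)) =>
      let title := pvRuleGet rule "title" "Unknown rule"
      let expected := pvRuleGet rule "expected_value" ""
      if expected ≠ "" then acc ++ ["- " ++ title ++ " (use: " ++ expected ++ ")"]
      else acc ++ ["- " ++ title])
      = fun acc rule => acc ++ [pvRuleLine rule] := by
    funext acc rule
    simp only [pvRuleLine]
    split_ifs <;> rfl
  rw [h, PySem.List.foldl_append_eq_flatMap (fun rule => [pvRuleLine rule])]
  congr 1
  induction rules with
  | nil => rfl
  | cons r rs ih => simp_all [List.flatMap]

theorem build_dynamic_claude_prompt_eq_alt (ai_rules : List (List (String × String)))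
    (document_text : String) :
    build_dynamic_claude_prompt ai_rules document_text
      = build_dynamic_claude_prompt_alt ai_rules document_text := by
  unfold build_dynamic_claude_prompt build_dynamic_claude_prompt_alt
  simp only []
  set key := fun rule => pvRuleGet rule "rule_type" "Other" with hkey
  set ks : List String := PySem.Set.ofList (ai_rules.map key) with hks
  set grp := fun t => ai_rules.filter (fun r => key r == t) with hgrp
  -- the dict
  rw [pvDict_eq]
  set D := ai_rules.foldl (fun d rule => d.modify (key rule) [] (fun l => l ++ [rule]))
    PySem.Dict.empty with hD
  have hkeys : D.keys = ks := by
    rw [hD, PySem.Dict.keys_foldl_modify_key ai_rules key [] (fun d rule l => l ++ [rule]),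
      PySem.Dict.keys_empty, PySem.Set.update_nil_left]
  have hnodup : D.keys.Nodup := by
    exact PySem.Dict.nodup_keys_foldl_modify_key ai_rules key []
      (fun d rule l => l ++ [rule]) PySem.Dict.empty PySem.Dict.nodup_keys_empty
  have hgetD : ∀ t, D.getD t [] = grp t := by
    intro t
    have : D = (ai_rules.map (fun r => (key r, r))).foldl
        (fun d p => d.modify p.1 [] (fun l => l ++ [p.2])) PySem.Dict.empty := by
      rw [hD, List.foldl_map]
    rw [this, PySem.Dict.getD_foldl_modify_append, PySem.Dict.getD_empty]
    simp [List.filter_map, hgrp, Function.comp_def]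
  have hitems : D.items = ks.map (fun t => (t, grp t)) := by
    rw [PySem.Dict.items_eq_map_keys D hnodup [], hkeys]
    exact List.map_congr_left (fun t _ => by rw [hgetD t])
  -- the sort
  have hsorted : PySem.List.sorted D.items (fun p => p.1)
      = (PySem.List.sorted ks (fun x => x)).map (fun t => (t, grp t)) := by
    apply PySem.List.sorted_eq_of_perm_of_pairwise_lt
    · rw [hitems]
      exact List.Perm.map _ (PySem.List.sorted_perm ks (fun x => x) false)
    · rw [List.pairwise_map]
      exact PySem.List.sorted_ofList_pairwise_lt (ai_rules.map key)
  rw [hsorted]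
  -- the outer loop
  rw [List.foldl_map]
  have houter : (fun (acc : List String) (t : String) =>
      grp t |>.foldl (fun acc rule =>
        let title := pvRuleGet rule "title" "Unknown rule"
        let expected := pvRuleGet rule "expected_value" ""
        if expected ≠ "" then acc ++ ["- " ++ title ++ " (use: " ++ expected ++ ")"]
        else acc ++ ["- " ++ title]) (acc ++ ["\n**" ++ t ++ " Rules:**"]))
      = fun acc t => acc ++ (("\n**" ++ t ++ " Rules:**") :: (grp t).map pvRuleLine) := by
    funext acc t
    rw [pvInner_eq]
    simp
  rw [houter, PySem.List.foldl_append_eq_flatMap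
    (fun t => ("\n**" ++ t ++ " Rules:**") :: (grp t).map pvRuleLine)]
  simp only [List.nil_append, hgrp, hkey]

-- ===== VERDICT (by name: the statement is the Claim_ definition above) =====
set_option maxRecDepth 4096 in
theorem build_dynamic_claude_prompt_spec : Claim_equal_build_dynamic_claude_prompt := by
  intro ai_rules document_text _
  unfold Spec_build_dynamic_claude_prompt
  exact build_dynamic_claude_prompt_eq_alt ai_rules document_text
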